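-- pv_equiv track=rewrite | github.com/IA-Generative/PIP-Organization-Chart-From-Grist | src/team_mission_summarizer.py | _compress_context_for_llm
-- ===== SOURCE A (Python) =====
-- from typing import List, Optional, Tuple
--
-- def _clean(text: str) -> str:
--     return (text or "").strip()
--
-- def _compress_context_for_llm(context: str, max_chars: int = 2200) -> str:
--     text = _clean(context)
--     if len(text) <= max_chars:
--         return text
--     lines = [ln.strip() for ln in text.splitlines() if ln.strip()]
--     kept: List[str] = []
--     total = 0
--     for ln in lines:
--         add = len(ln) + 1
--         if total + add > max_chars:
--             break
--         kept.append(ln)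
--         total += add
--     if not kept:
--         return text[:max_chars]
--     omitted = max(0, len(lines) - len(kept))
--     if omitted:
--         kept.append(f"... ({omitted} lignes omises pour respecter la limite)")
--     return "\n".join(kept)
-- ===== SOURCE B (Python) =====
-- from typing import List, Optional, Tuple
--
-- def _clean(text: str) -> str:
--     return (text or "").strip()
--
-- def _compress_context_for_llm(context: str, max_chars: int = 2200) -> str:
--     text = _clean(context)
--     if len(text) <= max_chars:
--         return text
--     lines = [ln.strip() for ln in text.splitlines() if ln.strip()]
--     # Work on the joined blob instead of iterating over lines: every kept line ends
--     # at a newline of blob, so the cut point is the last newline within the budget.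
--     blob = "\n".join(lines) + "\n"
--     head = blob[:max(0, max_chars)]
--     cut = head.rfind("\n")
--     if cut < 0:
--         return text[:max_chars]
--     body = blob[:cut]
--     omitted = len(lines) - head.count("\n")
--     if omitted:
--         body += f"\n... ({omitted} lignes omises pour respecter la limite)"
--     return body
-- ===== Notes on version B (the rewrite author's own statement) =====
-- stated objective: alternative
-- what changed: Instead of iterating over the line list with a running total, B joins the lines into one newline-terminated blob and finds the cut point as the last newline inside the first max_chars characters (str.rfind), counts kept lines with str.count on that window, and slices the blob once; no per-line accounting loop exists.
import Mathlib
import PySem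

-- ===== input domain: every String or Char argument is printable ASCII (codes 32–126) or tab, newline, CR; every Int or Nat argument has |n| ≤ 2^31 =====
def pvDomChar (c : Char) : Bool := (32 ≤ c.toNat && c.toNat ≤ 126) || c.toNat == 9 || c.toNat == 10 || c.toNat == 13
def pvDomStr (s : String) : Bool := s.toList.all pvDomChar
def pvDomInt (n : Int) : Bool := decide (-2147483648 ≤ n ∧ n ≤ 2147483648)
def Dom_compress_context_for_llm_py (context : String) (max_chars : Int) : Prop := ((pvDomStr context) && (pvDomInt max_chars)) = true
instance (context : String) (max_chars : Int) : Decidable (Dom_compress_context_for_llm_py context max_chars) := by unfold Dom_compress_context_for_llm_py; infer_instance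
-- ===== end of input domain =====

-- B replaces A's per-line running-total loop by string-level work on the joined blob:
-- the cut point is the last newline inside the first max_chars characters (rfind), the
-- number of kept lines is a newline count on that window (alternative decomposition, same cost).

-- ===== PORT A =====
-- the for-loop with break: kept grows while total + len(ln) + 1 fits the budget
def pvKeepA (lines : List String) (total max_chars : Int) : List String :=
  match lines with
  | [] => []
  | ln :: rest =>
    let add : Int := (PySem.Str.len ln : Int) + 1
    if total + add > max_chars then []
    else ln :: pvKeepA rest (total + add) max_chars

def compress_context_for_llm_py (context : String) (max_chars : Int) : String :=
  let text := PySem.Str.strip context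
  if (PySem.Str.len text : Int) ≤ max_chars then text
  else
    let lines := ((PySem.Str.splitlines text).map PySem.Str.strip).filter (fun l => decide (l ≠ ""))
    let kept := pvKeepA lines 0 max_chars
    if kept = [] then PySem.Str.slice text none (some max_chars)
    else
      let omitted : Int := max 0 ((lines.length : Int) - (kept.length : Int))
      let kept := if omitted ≠ 0 then
          kept ++ ["... (" ++ PySem.Int.toStr omitted ++ " lignes omises pour respecter la limite)"]
        else kept
      PySem.Str.join "\n" kept

-- ===== PORT B =====
def compress_context_for_llm_py_alt (context : String) (max_chars : Int) : String :=
  let text := PySem.Str.strip context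
  if (PySem.Str.len text : Int) ≤ max_chars then text
  else
    let lines := ((PySem.Str.splitlines text).map PySem.Str.strip).filter (fun l => decide (l ≠ ""))
    let blob := PySem.Str.join "\n" lines ++ "\n"
    let head := PySem.Str.slice blob none (some (max 0 max_chars))
    let cut := PySem.Str.rfind head "\n"
    if cut < 0 then PySem.Str.slice text none (some max_chars)
    else
      let body := PySem.Str.slice blob none (some cut)
      let omitted : Int := (lines.length : Int) - (PySem.Str.count head "\n" : Int)
      if omitted ≠ 0 then
        body ++ "\n... (" ++ PySem.Int.toStr omitted ++ " lignes omises pour respecter la limite)"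
      else body

-- ===== PRECONDITION & SPEC =====
def Spec_compress_context_for_llm_py (context : String) (max_chars : Int) (out : String) : Prop := out = compress_context_for_llm_py_alt context max_chars
instance (context : String) (max_chars : Int) (out : String) : Decidable (Spec_compress_context_for_llm_py context max_chars out) := by unfold Spec_compress_context_for_llm_py; infer_instance

-- ===== CLAIM (what is proved, stated in full; the proofs are below) =====
def Claim_equal_compress_context_for_llm_py : Prop := ∀ (context : String) (max_chars : Int), Dom_compress_context_for_llm_py context max_chars → Spec_compress_context_for_llm_py context max_chars (compress_context_for_llm_py context max_chars)

-- ===== LEMMAS AND PROOFS =====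

-- number of lines the break loop keeps, as a function of the remaining budget
def pvCut (P : List String) (b : Int) : Nat :=
  match P with
  | [] => 0
  | p :: r => if (PySem.Str.len p : Int) + 1 ≤ b then pvCut r (b - ((PySem.Str.len p : Int) + 1)) + 1 else 0

-- the joined blob with a trailing newline, one chunk per line
def pvBlob (P : List String) : List Char := (P.map (fun l => l.toList ++ ['\n'])).flatten

-- the line-break test splitlines uses
def pvIsB (c : Char) : Bool :=
  decide (c.toNat = 10) || decide (c.toNat = 13) || decide (c.toNat = 11) || decide (c.toNat = 12) ||
    decide (c.toNat = 28) || decide (c.toNat = 29) || decide (c.toNat = 30) || decide (c.toNat = 133) ||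
    decide (c.toNat = 8232) || decide (c.toNat = 8233)

lemma pvKeepA_eq_take (lines : List String) (total mc : Int) :
    pvKeepA lines total mc = lines.take (pvCut lines (mc - total)) := by
  induction lines generalizing total with
  | nil => simp [pvKeepA, pvCut]
  | cons ln rest ih =>
    simp only [pvKeepA, pvCut]
    by_cases h : total + ((PySem.Str.len ln : Int) + 1) > mc
    · rw [if_pos h, if_neg (by omega)]
      simp
    · rw [if_neg h, if_pos (by omega), ih]
      have he : mc - (total + ((PySem.Str.len ln : Int) + 1)) = mc - total - ((PySem.Str.len ln : Int) + 1) := by ring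
      rw [he, List.take_succ_cons]

lemma pvCut_length (P : List String) (b : Int) : pvCut P b ≤ P.length := by
  induction P generalizing b with
  | nil => simp [pvCut]
  | cons p r ih =>
    simp only [pvCut]
    split
    · have := ih (b - ((PySem.Str.len p : Int) + 1))
      simp only [List.length_cons]
      omega
    · simp

lemma pvCut_nonpos (P : List String) (b : Int) (h : b ≤ 0) : pvCut P b = 0 := by
  cases P with
  | nil => rfl
  | cons p r =>
    simp only [pvCut]
    rw [if_neg]
    have : (0:Int) ≤ (PySem.Str.len p : Int) := Int.natCast_nonneg _
    omega

lemma join_cons (s p : List Char) (Q : List (List Char)) (h : Q ≠ []) :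
    PySem.Chars.join s (p :: Q) = p ++ s ++ PySem.Chars.join s Q := by
  cases Q with
  | nil => exact absurd rfl h
  | cons q r => simp [PySem.Chars.join, List.intercalate, List.intersperse]

lemma join_append_singleton (s y : List Char) (Q : List (List Char)) (h : Q ≠ []) :
    PySem.Chars.join s (Q ++ [y]) = PySem.Chars.join s Q ++ s ++ y := by
  induction Q with
  | nil => exact absurd rfl h
  | cons p Q ih =>
    cases Q with
    | nil => simp [PySem.Chars.join, List.intercalate, List.intersperse]
    | cons q r =>
      rw [List.cons_append, join_cons s p ((q :: r) ++ [y]) (by simp),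
        join_cons s p (q :: r) (by simp), ih (by simp)]
      simp [List.append_assoc]

lemma blob_eq (P : List String) (h : P ≠ []) :
    PySem.Chars.join ['\n'] (P.map String.toList) ++ ['\n'] = pvBlob P := by
  induction P with
  | nil => exact absurd rfl h
  | cons p r ih =>
    cases r with
    | nil => simp [PySem.Chars.join, List.intercalate, List.intersperse, pvBlob]
    | cons q r' =>
      rw [List.map_cons, join_cons _ _ _ (by simp)]
      have := ih (by simp)
      simp only [pvBlob, List.map_cons, List.flatten_cons] at this ⊢
      rw [List.append_assoc, List.append_assoc, ← List.append_assoc ['\n'], ← this]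
      simp [List.append_assoc]

lemma count_join (Q : List String) (hnl : ∀ p ∈ Q, '\n' ∉ p.toList) (h : Q ≠ []) :
    (PySem.Chars.join ['\n'] (Q.map String.toList)).count '\n' = Q.length - 1 := by
  induction Q with
  | nil => exact absurd rfl h
  | cons p Q ih =>
    cases Q with
    | nil =>
      simp [PySem.Chars.join, List.intercalate, List.intersperse]
      exact List.count_eq_zero.mpr (hnl p (by simp))
    | cons q r =>
      rw [List.map_cons, join_cons _ _ _ (by simp), List.count_append, List.count_append]
      rw [ih (fun x hx => hnl x (List.mem_cons_of_mem _ hx)) (by simp)]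
      have h0 : (p.toList.count '\n') = 0 := List.count_eq_zero.mpr (hnl p (by simp))
      simp [h0, List.count_cons]
      omega

-- the first m characters of the blob split at the last complete line
lemma pvDecomp (P : List String) (m : Nat) (hnl : ∀ p ∈ P, '\n' ∉ p.toList) :
    ∃ t, '\n' ∉ t ∧
      ((pvCut P (m : Int) = 0 ∧ (pvBlob P).take m = t) ∨
       (1 ≤ pvCut P (m : Int) ∧
        (pvBlob P).take m =
          PySem.Chars.join ['\n'] ((P.take (pvCut P (m : Int))).map String.toList) ++ '\n' :: t)) := by
  induction P generalizing m with
  | nil => exact ⟨[], by simp, Or.inl ⟨rfl, by simp [pvBlob]⟩⟩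
  | cons p r ih =>
    have hL : p.toList.length = p.length := String.length_toList
    have hlen : (PySem.Str.len p : Int) = (p.toList.length : Int) := by
      simp [PySem.Str.len_eq]
    by_cases hm : p.toList.length + 1 ≤ m
    · have hcond : (PySem.Str.len p : Int) + 1 ≤ (m : Int) := by rw [hlen]; push_cast; omega
      have hval : ((m : Int) - ((PySem.Str.len p : Int) + 1)) = ((m - (p.toList.length + 1) : Nat) : Int) := by
        rw [hlen]; push_cast; omega
      obtain ⟨t, hnt, hcase⟩ := ih (m - (p.toList.length + 1)) (fun x hx => hnl x (List.mem_cons_of_mem _ hx))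
      have htake : (pvBlob (p :: r)).take m = p.toList ++ '\n' :: (pvBlob r).take (m - (p.toList.length + 1)) := by
        simp only [pvBlob, List.map_cons, List.flatten_cons]
        rw [List.take_append, List.take_of_length_le (by simp; omega)]
        simp [List.append_assoc]
      rcases hcase with ⟨hk0, ht⟩ | ⟨hk1, ht⟩
      · refine ⟨t, hnt, Or.inr ?_⟩
        have hk : pvCut (p :: r) (m : Int) = 1 := by
          simp only [pvCut]; rw [if_pos hcond, hval, hk0]
        rw [hk]
        refine ⟨le_rfl, ?_⟩
        rw [htake, ht]
        simp [PySem.Chars.join, List.intercalate]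
      · refine ⟨t, hnt, Or.inr ?_⟩
        have hk : pvCut (p :: r) (m : Int) = pvCut r ((m - (p.toList.length + 1) : Nat) : Int) + 1 := by
          simp only [pvCut]; rw [if_pos hcond, hval]
        rw [hk]
        refine ⟨by omega, ?_⟩
        rw [htake, ht, List.take_succ_cons, List.map_cons,
          join_cons _ _ _ (by
            simp only [ne_eq, List.map_eq_nil_iff, List.take_eq_nil_iff]
            push_neg
            constructor
            · omega
            · intro hr; rw [hr] at hk1; simp [pvCut] at hk1)]
        simp [List.append_assoc]
    · have hcond : ¬ ((PySem.Str.len p : Int) + 1 ≤ (m : Int)) := by rw [hlen]; push_cast; omega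
      have hk : pvCut (p :: r) (m : Int) = 0 := by simp only [pvCut]; rw [if_neg hcond]
      refine ⟨p.toList.take m, ?_, Or.inl ⟨hk, ?_⟩⟩
      · intro hc
        exact hnl p (by simp) (List.mem_of_mem_take hc)
      · simp only [pvBlob, List.map_cons, List.flatten_cons]
        rw [List.take_append_of_le_length (by simp; omega),
          List.take_append_of_le_length (by omega)]

-- rfind.go step lemmas
lemma rgo_zero (s sub : List Char) :
    PySem.Chars.rfind.go s sub 0 = if sub.isPrefixOf s then 0 else -1 := by
  simp [PySem.Chars.rfind.go]

lemma rgo_succ (s sub : List Char) (j : Nat) :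
    PySem.Chars.rfind.go s sub (j+1) =
      if sub.isPrefixOf (s.drop (j+1)) then ((j:Int)+1) else PySem.Chars.rfind.go s sub j := by
  simp [PySem.Chars.rfind.go]

lemma pfx_single (c : Char) (l : List Char) : [c].isPrefixOf l = true ↔ l.head? = some c := by
  cases l with
  | nil => simp [List.isPrefixOf]
  | cons a t =>
    simp [List.isPrefixOf]
    exact eq_comm

lemma rgo_none (t : List Char) (hnl : '\n' ∉ t) (j : Nat) :
    PySem.Chars.rfind.go t ['\n'] j = -1 := by
  induction j with
  | zero =>
    have hp : ¬ (['\n'].isPrefixOf t = true) := by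
      intro h
      rw [pfx_single] at h
      cases t with
      | nil => simp at h
      | cons a s =>
        simp at h
        exact hnl (h ▸ List.mem_cons_self ..)
    rw [rgo_zero, if_neg hp]
  | succ j ih =>
    have hp : ¬ (['\n'].isPrefixOf (t.drop (j+1)) = true) := by
      intro h
      rw [pfx_single, List.head?_drop] at h
      exact hnl (List.mem_of_getElem? h)
    rw [rgo_succ, if_neg hp, ih]

lemma rfind_none (t : List Char) (hnl : '\n' ∉ t) : PySem.Chars.rfind t ['\n'] = -1 := by
  rw [PySem.Chars.rfind.eq_def]
  exact rgo_none t hnl t.length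

lemma rgo_last (u t : List Char) (hnl : '\n' ∉ t) (j : Nat) (hj : u.length ≤ j) :
    PySem.Chars.rfind.go (u ++ '\n' :: t) ['\n'] j = (u.length : Int) := by
  induction j with
  | zero =>
    have hu : u = [] := List.eq_nil_of_length_eq_zero (by omega)
    subst hu
    rw [rgo_zero, if_pos (by rw [pfx_single]; simp)]
    simp
  | succ j ih =>
    by_cases h : u.length = j + 1
    · have hp : ['\n'].isPrefixOf ((u ++ '\n' :: t).drop (j+1)) = true := by
        rw [← h, pfx_single, List.head?_drop, List.getElem?_append_right (by omega)]
        simp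
      rw [rgo_succ, if_pos hp]
      omega
    · have hle : u.length ≤ j := by omega
      have hp : ¬ (['\n'].isPrefixOf ((u ++ '\n' :: t).drop (j+1)) = true) := by
        intro hp
        rw [pfx_single, List.head?_drop, List.getElem?_append_right (by omega)] at hp
        rw [show j + 1 - u.length = (j - u.length) + 1 by omega] at hp
        simp at hp
        exact hnl (List.mem_of_getElem? hp)
      rw [rgo_succ, if_neg hp, ih hle]

lemma rfind_last (u t : List Char) (hnl : '\n' ∉ t) :
    PySem.Chars.rfind (u ++ '\n' :: t) ['\n'] = (u.length : Int) := by
  rw [PySem.Chars.rfind.eq_def]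
  exact rgo_last u t hnl _ (by simp)

-- count.go for a single-character needle is List.count
lemma cgo (c : Char) (l : List Char) (fuel acc : Nat) (h : l.length ≤ fuel) :
    PySem.Chars.count.go [c] fuel l acc = acc + l.count c := by
  induction fuel generalizing l acc with
  | zero =>
    have : l = [] := List.eq_nil_of_length_eq_zero (by omega)
    subst this
    simp [PySem.Chars.count.go]
  | succ n ih =>
    cases l with
    | nil => simp [PySem.Chars.count.go]
    | cons x t =>
      simp only [PySem.Chars.count.go]
      split
      · next hpf =>
        have hx : x = c := by
          rw [pfx_single] at hpf
          simpa using hpf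
        subst hx
        simp only [List.length_cons, List.length_nil, List.drop_succ_cons, List.drop_zero]
        rw [ih t (acc + 1) (by simpa using h)]
        simp [List.count_cons]
        omega
      · next hpf =>
        have hx : ¬ (x = c) := by
          intro hxc
          subst hxc
          rw [pfx_single] at hpf
          simp at hpf
        rw [ih t acc (by simpa using h)]
        simp [List.count_cons, hx]

lemma count_single (cs : List Char) (c : Char) : PySem.Chars.count cs [c] = cs.count c := by
  simp [PySem.Chars.count]
  rw [cgo c cs cs.length 0 le_rfl]
  omega

-- splitlines keeps exactly the non-break characters, in order
lemma sgo_flat (isB : Char → Bool) (s cur : List Char) (acc : List (List Char))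
    (hr : isB '\r' = true) (hn : isB '\n' = true) :
    (PySem.Chars.splitlines.go isB s cur acc).flatten =
      acc.reverse.flatten ++ cur.reverse ++ s.filter (fun c => !isB c) := by
  fun_induction PySem.Chars.splitlines.go isB s cur acc with
  | case1 cur acc h => simp_all [List.isEmpty_iff]
  | case2 cur acc h => simp
  | case3 rest cur acc ih => rw [ih]; simp [hr, hn]
  | case4 c rest cur acc hx h ih => rw [ih]; simp [h]
  | case5 c rest cur acc hx h ih => rw [ih]; simp [h, List.append_assoc]

lemma splitlines_flatten (cs : List Char) :
    (PySem.Chars.splitlines cs).flatten = cs.filter (fun c => !pvIsB c) := by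
  simp only [PySem.Chars.splitlines]
  rw [sgo_flat _ _ _ _ (by decide) (by decide)]
  simp [pvIsB]

lemma strip_sublist (l : List Char) : List.Sublist (PySem.Chars.strip l) l := by
  unfold PySem.Chars.strip PySem.Chars.rstrip PySem.Chars.lstrip
  have h1 : List.Sublist (List.dropWhile PySem.Chars.isspace (List.dropWhile PySem.Chars.isspace l).reverse)
      (List.dropWhile PySem.Chars.isspace l).reverse := List.dropWhile_sublist _
  have h2 := h1.reverse
  rw [List.reverse_reverse] at h2
  exact h2.trans (List.dropWhile_sublist _)

lemma dropWhile_head (p : Char → Bool) (l : List Char) (c : Char) (t : List Char)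
    (h : l.dropWhile p = c :: t) : p c = false := by
  induction l with
  | nil => simp at h
  | cons a l ih =>
    rw [List.dropWhile_cons] at h
    by_cases hpa : p a = true
    · rw [if_pos hpa] at h
      exact ih h
    · rw [if_neg hpa] at h
      cases h
      simpa using hpa

lemma strip_head (l : List Char) (c : Char) (t : List Char)
    (h : PySem.Chars.strip l = c :: t) : PySem.Chars.isspace c = false := by
  unfold PySem.Chars.strip PySem.Chars.rstrip at h
  set y := PySem.Chars.lstrip l with hy
  have hpref : List.IsPrefix (c :: t) y := by
    have : List.IsSuffix (List.dropWhile PySem.Chars.isspace y.reverse) y.reverse :=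
      List.dropWhile_suffix _
    have h2 := this.reverse
    rw [List.reverse_reverse, h] at h2
    exact h2
  obtain ⟨rest, hrest⟩ := hpref
  unfold PySem.Chars.lstrip at hy
  refine dropWhile_head _ l c (t ++ rest) ?_
  rw [← hy, ← hrest, List.cons_append]

lemma strip_nil_all (l : List Char) (h : PySem.Chars.strip l = []) :
    ∀ c ∈ l, PySem.Chars.isspace c = true := by
  unfold PySem.Chars.strip PySem.Chars.rstrip at h
  have h2 : List.dropWhile PySem.Chars.isspace (PySem.Chars.lstrip l).reverse = [] := by
    rwa [List.reverse_eq_nil_iff] at h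
  rw [List.dropWhile_eq_nil_iff] at h2
  intro c hc
  rw [← List.takeWhile_append_dropWhile (p := PySem.Chars.isspace) (l := l)] at hc
  rcases List.mem_append.mp hc with h3 | h3
  · exact List.mem_takeWhile_imp h3
  · exact h2 c (by simpa using h3)

lemma dom_nonspace_nonbreak (c : Char) (hd : pvDomChar c = true)
    (hs : PySem.Chars.isspace c = false) : pvIsB c = false := by
  simp only [pvDomChar, Bool.or_eq_true, Bool.and_eq_true, decide_eq_true_eq, beq_iff_eq] at hd
  have hsp : ∀ hn : (9 ≤ c.toNat ∧ c.toNat ≤ 13) ∨ c.toNat = 32, PySem.Chars.isspace c = true := by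
    intro hn
    simp only [PySem.Chars.isspace, Bool.or_eq_true, Bool.and_eq_true, decide_eq_true_eq]
    omega
  simp only [pvIsB, Bool.or_eq_false_iff, decide_eq_false_iff_not]
  have hd' : (32 ≤ c.toNat ∧ c.toNat ≤ 126) ∨ c.toNat = 9 ∨ c.toNat = 10 ∨ c.toNat = 13 := by
    tauto
  rcases hd' with ⟨h1, h2⟩ | h | h | h
  · omega
  · omega
  · simp [PySem.Chars.isspace, h] at hs
  · simp [PySem.Chars.isspace, h] at hs

-- every final line is free of newline characters
lemma lines_nb (text : String) :
    ∀ ln ∈ ((PySem.Str.splitlines text).map PySem.Str.strip).filter (fun l => decide (l ≠ "")),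
      '\n' ∉ ln.toList := by
  intro ln hln
  have hln2 := List.mem_of_mem_filter hln
  obtain ⟨p, hp, rfl⟩ := List.mem_map.mp hln2
  intro hc
  have hc2 : '\n' ∈ p.toList := by
    have hsub := strip_sublist p.toList
    have : (PySem.Str.strip p).toList = PySem.Chars.strip p.toList := by simp [PySem.Str.toList_strip]
    rw [this] at hc
    exact hsub.mem hc
  have hflat : '\n' ∈ (PySem.Chars.splitlines text.toList).flatten := by
    rw [List.mem_flatten]
    refine ⟨p.toList, ?_, hc2⟩
    have := PySem.Str.splitlines_map_toList text
    rw [← this]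
    exact List.mem_map.mpr ⟨p, hp, rfl⟩
  rw [splitlines_flatten] at hflat
  have := List.of_mem_filter hflat
  simp [pvIsB] at this

-- a nonempty stripped Dom string yields at least one kept line
lemma lines_ne_nil (context : String) (hd : pvDomStr context = true)
    (hne : PySem.Str.strip context ≠ "") :
    ((PySem.Str.splitlines (PySem.Str.strip context)).map PySem.Str.strip).filter
      (fun l => decide (l ≠ "")) ≠ [] := by
  intro h0
  have hts : (PySem.Str.strip context).toList = PySem.Chars.strip context.toList := by
    simp [PySem.Str.toList_strip]
  have htl : (PySem.Str.strip context).toList ≠ [] := by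
    intro hnil
    exact hne (String.toList_inj.mp (by rw [hnil]; rfl))
  obtain ⟨c, r, hcr⟩ : ∃ c r, (PySem.Str.strip context).toList = c :: r := by
    cases hcl : (PySem.Str.strip context).toList with
    | nil => exact absurd hcl htl
    | cons a b => exact ⟨a, b, rfl⟩
  have hsp : PySem.Chars.isspace c = false :=
    strip_head context.toList c r (by rw [← hts, hcr])
  have hmemtext : c ∈ (PySem.Str.strip context).toList := by
    rw [hcr]; exact List.mem_cons_self ..
  have hmemctx : c ∈ context.toList := (strip_sublist context.toList).mem (hts ▸ hmemtext)
  have hdc : pvDomChar c = true := by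
    simp only [pvDomStr, List.all_eq_true] at hd
    exact hd c hmemctx
  have hnb : pvIsB c = false := dom_nonspace_nonbreak c hdc hsp
  have hall : ∀ p ∈ PySem.Str.splitlines (PySem.Str.strip context), PySem.Str.strip p = "" := by
    intro p hp
    by_contra hpne
    have hmemf : PySem.Str.strip p ∈
        ((PySem.Str.splitlines (PySem.Str.strip context)).map PySem.Str.strip).filter
          (fun l => decide (l ≠ "")) :=
      List.mem_filter.mpr ⟨List.mem_map.mpr ⟨p, hp, rfl⟩, by simpa using hpne⟩
    rw [h0] at hmemf
    simp at hmemf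
  have hflat : ∀ ch ∈ (PySem.Chars.splitlines (PySem.Str.strip context).toList).flatten,
      PySem.Chars.isspace ch = true := by
    intro ch hch
    rw [List.mem_flatten] at hch
    obtain ⟨piece, hpiece, hchp⟩ := hch
    rw [← PySem.Str.splitlines_map_toList] at hpiece
    obtain ⟨pStr, hpStr, rfl⟩ := List.mem_map.mp hpiece
    have hstrip0 : PySem.Chars.strip pStr.toList = [] := by
      have h2 : (PySem.Str.strip pStr).toList = [] := by rw [hall pStr hpStr]; rfl
      rwa [PySem.Str.toList_strip] at h2
    exact strip_nil_all pStr.toList hstrip0 ch hchp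
  have hcfl : c ∈ (PySem.Chars.splitlines (PySem.Str.strip context).toList).flatten := by
    rw [splitlines_flatten]
    exact List.mem_filter.mpr ⟨hmemtext, by simp [hnb]⟩
  rw [hflat c hcfl] at hsp
  simp at hsp

-- ===== VERDICT (by name: the statement is the Claim_ definition above) =====
set_option maxHeartbeats 1000000 in
theorem compress_context_for_llm_py_spec : Claim_equal_compress_context_for_llm_py := by
  intro context mc hdom
  have hdS : pvDomStr context = true := by
    unfold Dom_compress_context_for_llm_py at hdom
    simp only [Bool.and_eq_true] at hdom
    exact hdom.1
  unfold Spec_compress_context_for_llm_py compress_context_for_llm_py compress_context_for_llm_py_alt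
  simp only
  by_cases h1 : (PySem.Str.len (PySem.Str.strip context) : Int) ≤ mc
  · rw [if_pos h1, if_pos h1]
  · rw [if_neg h1, if_neg h1]
    set text := PySem.Str.strip context with htext
    set lines := ((PySem.Str.splitlines text).map PySem.Str.strip).filter (fun l => decide (l ≠ "")) with hlines
    rw [pvKeepA_eq_take lines 0 mc, sub_zero]
    have hnl : ∀ p ∈ lines, '\n' ∉ p.toList := by
      intro p hp
      exact lines_nb text p (by rw [← hlines] at *; exact hp)
    by_cases hmc : mc ≤ 0
    · -- budget nonpositive: A keeps nothing, B's window is empty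
      rw [pvCut_nonpos lines mc hmc, List.take_zero, if_pos rfl]
      have hm0 : max 0 mc = (0:Int) := by omega
      have hh : (PySem.Str.slice (PySem.Str.join "\n" lines ++ "\n") none (some (max 0 mc))).toList = [] := by
        rw [hm0, PySem.Str.toList_slice]
        simp only [PySem.Chars.slice_eq_listSlice]
        rw [show (0:Int) = ((0:Nat):Int) from rfl, PySem.List.slice_to_natCast]
        simp
      have hr : PySem.Str.rfind (PySem.Str.slice (PySem.Str.join "\n" lines ++ "\n") none (some (max 0 mc))) "\n" = -1 := by
        rw [PySem.Str.rfind_eq, hh]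
        exact rfind_none [] (by simp)
      rw [hr, if_pos (by decide : (-1:Int) < 0)]
    · -- positive budget
      have htne : text ≠ "" := by
        intro h0
        rw [h0] at h1
        simp [PySem.Str.len_eq] at h1
        omega
      have hlne : lines ≠ [] := by
        rw [hlines, htext]
        exact lines_ne_nil context hdS (by rw [← htext]; exact htne)
      set m : Nat := mc.toNat with hm
      have hmcm : (m : Int) = mc := by omega
      have hmmax : max 0 mc = (m : Int) := by omega
      have hblob : (PySem.Str.join "\n" lines ++ "\n").toList = pvBlob lines := by
        rw [String.toList_append, PySem.Str.toList_join]
        have : ("\n" : String).toList = ['\n'] := rfl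
        rw [this]
        exact blob_eq lines hlne
      have hhead : (PySem.Str.slice (PySem.Str.join "\n" lines ++ "\n") none (some (max 0 mc))).toList = (pvBlob lines).take m := by
        rw [PySem.Str.toList_slice, hmmax]
        simp only [PySem.Chars.slice_eq_listSlice]
        rw [PySem.List.slice_to_natCast, hblob]
      obtain ⟨t, hnt, hcase⟩ := pvDecomp lines m hnl
      rcases hcase with ⟨hk0, ht⟩ | ⟨hk1, ht⟩
      · -- nothing fits: both fall back to a raw character slice
        have hkA : pvCut lines mc = 0 := by rw [← hmcm]; exact hk0
        rw [hkA, List.take_zero, if_pos rfl]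
        have hr : PySem.Str.rfind (PySem.Str.slice (PySem.Str.join "\n" lines ++ "\n") none (some (max 0 mc))) "\n" = -1 := by
          rw [PySem.Str.rfind_eq, hhead, ht]
          exact rfind_none t hnt
        rw [hr, if_pos (by decide : (-1:Int) < 0)]
      · -- k ≥ 1 lines fit
        set k := pvCut lines ((m : Nat) : Int) with hkdef
        set u := PySem.Chars.join ['\n'] ((lines.take k).map String.toList) with hu
        have hk_le : k ≤ lines.length := pvCut_length lines _
        have hkA : pvCut lines mc = k := by rw [← hmcm]
        have htake_ne : lines.take k ≠ [] := by
          rw [ne_eq, List.take_eq_nil_iff]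
          push_neg
          exact ⟨by omega, hlne⟩
        rw [hkA, if_neg htake_ne]
        have hheadfull : (PySem.Str.slice (PySem.Str.join "\n" lines ++ "\n") none (some (max 0 mc))).toList = u ++ '\n' :: t := by
          rw [hhead, ht]
        have hr : PySem.Str.rfind (PySem.Str.slice (PySem.Str.join "\n" lines ++ "\n") none (some (max 0 mc))) "\n" = (u.length : Int) := by
          rw [PySem.Str.rfind_eq, hheadfull]
          exact rfind_last u t hnt
        rw [hr, if_neg (not_lt.mpr (Int.natCast_nonneg u.length))]
        -- the newline count in the window is k
        have hcnt : PySem.Str.count (PySem.Str.slice (PySem.Str.join "\n" lines ++ "\n") none (some (max 0 mc))) "\n" = k := by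
          rw [PySem.Str.count_eq, hheadfull]
          have : ("\n" : String).toList = ['\n'] := rfl
          rw [this, count_single, List.count_append]
          have hcu : List.count '\n' u = k - 1 := by
            rw [hu, count_join (lines.take k) (fun p hp => hnl p (List.mem_of_mem_take hp)) htake_ne,
              List.length_take, min_eq_left hk_le]
          have hct : List.count '\n' ('\n' :: t) = 1 := by
            rw [List.count_cons_self, List.count_eq_zero.mpr hnt]
          rw [hcu, hct]
          omega
        rw [hcnt]
        -- kept length
        have hklen : (lines.take k).length = k := by
          rw [List.length_take, min_eq_left hk_le]
        rw [hklen]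
        have hmaxom : max 0 ((lines.length : Int) - (k : Int)) = (lines.length : Int) - (k : Int) := by
          omega
        rw [hmaxom]
        -- the body slice is exactly the joined kept lines
        have hulen : u.length ≤ m := by
          have hlt := congrArg List.length ht
          rw [List.length_take, List.length_append, List.length_cons] at hlt
          omega
        have hbody : (PySem.Str.slice (PySem.Str.join "\n" lines ++ "\n") none (some ((u.length : Nat) : Int))).toList = u := by
          rw [PySem.Str.toList_slice]
          simp only [PySem.Chars.slice_eq_listSlice]
          rw [PySem.List.slice_to_natCast, hblob]
          have hsplit : (pvBlob lines).take u.length = ((pvBlob lines).take m).take u.length := by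
            rw [List.take_take, min_eq_left hulen]
          rw [hsplit, ht, List.take_append_of_le_length le_rfl, List.take_length]
        have hjoin : (PySem.Str.join "\n" (lines.take k)).toList = u := by
          rw [PySem.Str.toList_join]
          rfl
        by_cases hom : ((lines.length : Int) - (k : Int)) = 0
        · rw [if_neg (by omega), if_neg (by omega)]
          apply String.toList_inj.mp
          rw [hjoin, hbody]
        · rw [if_pos (by omega), if_pos (by omega)]
          apply String.toList_inj.mp
          rw [PySem.Str.toList_join, List.map_append, List.map_singleton,
            show ("\n" : String).toList = ['\n'] from rfl,
            join_append_singleton _ _ _ (by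
              simp only [ne_eq, List.map_eq_nil_iff]
              exact htake_ne)]
          simp only [String.toList_append, hbody]
          rw [show (("\n... (" : String)).toList = '\n' :: ("... (" : String).toList from rfl, ← hu]
          simp only [List.append_assoc, List.cons_append, List.singleton_append, List.nil_append]
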